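-- pv_equiv track=rewrite | github.com/Ajay-Goswami/Python_DSA | Day 11 - Advanced_Recursion_and_Backtracking/02_Find_All_Subsequences_with_Sum_is_equal_to_K.py | find_subsequences_with_sum_k
-- ===== SOURCE A (Python) =====
-- def find_subsequences_with_sum_k(arr, k, index=0, current=None, current_sum=0, result=None):
--     if current is None:
--         current = []
--     if result is None:
--         result = []
--
--     # Base case: if we have considered all elements
--     if index == len(arr):
--         if current_sum == k:
--             result.append(current.copy())
--         return result
--
--     # Include the current element
--     current.append(arr[index])
--     find_subsequences_with_sum_k(arr, k, index + 1, current, current_sum + arr[index], result)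
--
--     # Exclude the current element
--     current.pop()
--     find_subsequences_with_sum_k(arr, k, index + 1, current, current_sum, result)
--
--     return result
-- ===== SOURCE B (Python) =====
-- def find_subsequences_with_sum_k(arr, k, index=0, current=None, current_sum=0, result=None):
--     if current is None:
--         current = []
--     if result is None:
--         result = []
--     m = len(arr) - index
--     # enumerate the 2**m subsets of the remaining positions; the position `index`
--     # is the most significant bit and 'included' = 1, so descending codes give
--     # exactly the DFS include-first leaf order
--     for code in range(2 ** m - 1, -1, -1):
--         picked = [arr[index + j] for j in range(m) if (code >> (m - 1 - j)) & 1]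
--         if current_sum + sum(picked) == k:
--             result.append(current + picked)
--     return result
-- ===== Notes on version B (the rewrite author's own statement) =====
-- stated objective: alternative
-- what changed: Replaces A's include/exclude recursion (with mutation and backtracking of `current`) by a single iterative loop over the 2^m bitmask codes of the remaining positions, enumerated in descending order so the subsequences come out in exactly A's DFS leaf order.
import Mathlib
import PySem

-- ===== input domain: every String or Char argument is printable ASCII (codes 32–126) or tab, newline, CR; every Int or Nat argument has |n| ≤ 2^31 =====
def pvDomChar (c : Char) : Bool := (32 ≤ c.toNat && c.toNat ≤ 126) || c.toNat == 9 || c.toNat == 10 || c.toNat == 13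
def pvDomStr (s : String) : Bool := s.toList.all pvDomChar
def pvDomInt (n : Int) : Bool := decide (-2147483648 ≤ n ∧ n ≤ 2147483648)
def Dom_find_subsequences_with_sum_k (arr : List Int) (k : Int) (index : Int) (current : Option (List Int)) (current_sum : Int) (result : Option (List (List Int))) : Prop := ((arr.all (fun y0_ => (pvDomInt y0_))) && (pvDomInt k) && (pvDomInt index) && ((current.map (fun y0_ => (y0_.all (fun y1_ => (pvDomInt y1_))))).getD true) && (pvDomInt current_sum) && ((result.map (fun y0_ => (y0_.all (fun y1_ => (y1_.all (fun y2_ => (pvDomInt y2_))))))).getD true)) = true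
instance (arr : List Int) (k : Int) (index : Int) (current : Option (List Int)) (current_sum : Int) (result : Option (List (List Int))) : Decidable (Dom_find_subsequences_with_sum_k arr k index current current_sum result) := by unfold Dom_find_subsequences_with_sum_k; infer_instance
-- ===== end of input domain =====

-- B replaces A's include/exclude recursion by a single iterative loop over the 2^m bitmask codes
-- of the remaining positions, enumerated in A's DFS leaf order (objective: alternative algorithm).
-- Both A and B append the found subsequences into the caller's `result` list in place (A's
-- temporary mutation of `current` is restored before returning); the equivalence proved here is
-- about the returned value.

-- ===== PORT A =====
-- recursive helper = A's body after the two `is None` defaults have been resolved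
def pvA_go (arr : List Int) (k : Int) (index : Int) (cur : List Int) (cs : Int) (res : List (List Int)) : List (List Int) :=
  if index = (arr.length : Int) then
    if cs = k then res ++ [cur] else res
  else
    match hv : PySem.List.pyGet? arr index with
    | none => res  -- Python raises IndexError here (outside Pre_)
    | some v =>
      -- include arr[index], then exclude it; `result` is threaded through both calls
      pvA_go arr k (index + 1) cur cs (pvA_go arr k (index + 1) (cur ++ [v]) (cs + v) res)
termination_by ((arr.length : Int) + 1 - index).toNat
decreasing_by
  all_goals
    have h1 : ¬ PySem.List.pyGet? arr index = none := by simp [hv]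
    rw [PySem.List.pyGet?_eq_none_iff, not_not] at h1
    simp only [PySem.Raise.InRange] at h1
    omega

def find_subsequences_with_sum_k (arr : List Int) (k : Int) (index : Int) (current : Option (List Int)) (current_sum : Int) (result : Option (List (List Int))) : List (List Int) :=
  pvA_go arr k index (current.getD []) current_sum (result.getD [])

-- ===== PORT B =====
-- picked = [arr[index + j] for j in range(m) if (code >> (m - 1 - j)) & 1]
-- (pyGetD is exact here: inside Pre_ every accessed position is in range)
def pvB_pick (arr : List Int) (index : Int) (m : Nat) (code : Nat) : List Int :=
  (List.range m).filterMap (fun j =>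
    if (code >>> (m - 1 - j)) &&& 1 = 1 then some (PySem.List.pyGetD arr (index + (j : Int)) 0) else none)

-- the loop `for code in range(2 ** m - 1, -1, -1)`; that descending range is exactly
-- (List.range (2 ^ m)).reverse
def pvB_go (arr : List Int) (k : Int) (index : Int) (cur : List Int) (cs : Int) (res : List (List Int)) (m : Nat) : List (List Int) :=
  ((List.range (2 ^ m)).reverse).foldl
    (fun acc code =>
      let picked := pvB_pick arr index m code
      if cs + picked.sum = k then acc ++ [cur ++ picked] else acc) res

def find_subsequences_with_sum_k_alt (arr : List Int) (k : Int) (index : Int) (current : Option (List Int)) (current_sum : Int) (result : Option (List (List Int))) : List (List Int) :=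
  let m : Int := (arr.length : Int) - index
  -- m < 0 only outside Pre_, where Python's `range(2 ** m - 1, …)` raises (2**m is a float)
  if m < 0 then result.getD []
  else pvB_go arr k index (current.getD []) current_sum (result.getD []) m.toNat

-- ===== PRECONDITION & SPEC =====
-- A returns normally exactly when -len(arr) ≤ index ≤ len(arr); otherwise its arr[index]
-- raises IndexError.
def Pre_find_subsequences_with_sum_k (arr : List Int) (k : Int) (index : Int) (current : Option (List Int)) (current_sum : Int) (result : Option (List (List Int))) : Prop :=
  -(arr.length : Int) ≤ index ∧ index ≤ (arr.length : Int)
instance (arr : List Int) (k : Int) (index : Int) (current : Option (List Int)) (current_sum : Int) (result : Option (List (List Int))) : Decidable (Pre_find_subsequences_with_sum_k arr k index current current_sum result) := by unfold Pre_find_subsequences_with_sum_k; infer_instance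

def pvWitness_find_subsequences_with_sum_k : List Int × Int × Int × Option (List Int) × Int × Option (List (List Int)) :=
  ([1, 2, 1], 2, 0, none, 0, none)

def Spec_find_subsequences_with_sum_k (arr : List Int) (k : Int) (index : Int) (current : Option (List Int)) (current_sum : Int) (result : Option (List (List Int))) (out : List (List Int)) : Prop := out = find_subsequences_with_sum_k_alt arr k index current current_sum result
instance (arr : List Int) (k : Int) (index : Int) (current : Option (List Int)) (current_sum : Int) (result : Option (List (List Int))) (out : List (List Int)) : Decidable (Spec_find_subsequences_with_sum_k arr k index current current_sum result out) := by unfold Spec_find_subsequences_with_sum_k; infer_instance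

-- ===== CLAIM (what is proved, stated in full; the proofs are below) =====
def Claim_equal_find_subsequences_with_sum_k : Prop := ∀ (arr : List Int) (k : Int) (index : Int) (current : Option (List Int)) (current_sum : Int) (result : Option (List (List Int))), Dom_find_subsequences_with_sum_k arr k index current current_sum result → Pre_find_subsequences_with_sum_k arr k index current current_sum result → Spec_find_subsequences_with_sum_k arr k index current current_sum result (find_subsequences_with_sum_k arr k index current current_sum result)

-- ===== LEMMAS AND PROOFS =====

-- reference: the DFS leaf sequence over a list of remaining values (include branch first)
def pvLeaves (k : Int) : List Int → List Int → Int → List (List Int)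
  | [], cur, cs => if cs = k then [cur] else []
  | v :: rest, cur, cs => pvLeaves k rest (cur ++ [v]) (cs + v) ++ pvLeaves k rest cur cs

-- the m values arr[index], arr[index+1], …
def pvVals (arr : List Int) : Nat → Int → List Int
  | 0, _ => []
  | m + 1, i => PySem.List.pyGetD arr i 0 :: pvVals arr m (i + 1)

theorem pvA_go_eq (arr : List Int) (k : Int) : ∀ (m : Nat) (index : Int)
    (cur : List Int) (cs : Int) (res : List (List Int)),
    -(arr.length : Int) ≤ index → index ≤ (arr.length : Int) →
    ((arr.length : Int) - index).toNat = m →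
    pvA_go arr k index cur cs res = res ++ pvLeaves k (pvVals arr m index) cur cs := by
  intro m
  induction m with
  | zero =>
    intro index cur cs res h1 h2 hm
    have : index = (arr.length : Int) := by omega
    rw [pvA_go, if_pos this]
    simp only [pvVals, pvLeaves]
    split <;> simp
  | succ m ih =>
    intro index cur cs res h1 h2 hm
    have hlt : index < (arr.length : Int) := by omega
    have hin : PySem.Raise.InRange arr.length index := by
      simp only [PySem.Raise.InRange]; omega
    have hne : ¬ PySem.List.pyGet? arr index = none := by
      rw [PySem.List.pyGet?_eq_none_iff, not_not]; exact hin
    rw [pvA_go, if_neg (by omega)]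
    split
    next h => exact absurd h hne
    next v h =>
      have hvd : PySem.List.pyGetD arr index 0 = v := by
        simp [PySem.List.pyGetD, h]
      rw [ih (index + 1) (cur ++ [v]) (cs + v) res (by omega) (by omega) (by omega),
          ih (index + 1) cur cs _ (by omega) (by omega) (by omega)]
      simp [pvVals, pvLeaves, hvd, List.append_assoc]

-- bit facts for the split of codes into the upper (MSB set) and lower half
theorem pv_bit_high (m c : Nat) (hc : c < 2 ^ m) : (2 ^ m + c) >>> m % 2 = 1 := by
  rw [Nat.shiftRight_eq_div_pow]
  have : (2 ^ m + c) / 2 ^ m = 1 + c / 2 ^ m := by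
    rw [Nat.add_comm, Nat.add_div_right _ (Nat.two_pow_pos m), Nat.add_comm]
  rw [this, Nat.div_eq_of_lt hc]

theorem pv_bit_top (m c : Nat) (hc : c < 2 ^ m) : c >>> m % 2 = 0 := by
  rw [Nat.shiftRight_eq_div_pow, Nat.div_eq_of_lt hc]

theorem pv_bit_low (m c i : Nat) (hi : i < m) :
    (2 ^ m + c) >>> i % 2 = c >>> i % 2 := by
  rw [Nat.shiftRight_eq_div_pow, Nat.shiftRight_eq_div_pow]
  have hm : 2 ^ m = 2 ^ i * 2 ^ (m - i) := by
    rw [← pow_add]; congr 1; omega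
  have hd : (2 ^ m + c) / 2 ^ i = 2 ^ (m - i) + c / 2 ^ i := by
    rw [hm, Nat.mul_add_div (Nat.two_pow_pos i)]
  rw [hd]
  have he : 2 ^ (m - i) = 2 * 2 ^ (m - i - 1) := by
    rw [← pow_succ']; congr 1; omega
  omega

theorem pvB_pick_high (arr : List Int) (index : Int) (m c : Nat) (hc : c < 2 ^ m) :
    pvB_pick arr index (m + 1) (2 ^ m + c) =
      PySem.List.pyGetD arr index 0 :: pvB_pick arr (index + 1) m c := by
  unfold pvB_pick
  rw [List.range_succ_eq_map, List.filterMap_cons, List.filterMap_map]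
  simp only [Nat.add_sub_cancel, Nat.sub_zero, Nat.and_one_is_mod, pv_bit_high m c hc]
  norm_num
  apply List.filterMap_congr
  intro j hj
  have hj' : j < m := List.mem_range.mp hj
  have h1 : m - (j + 1) = m - 1 - j := by omega
  have h2 : m - 1 - j < m := by omega
  have h3 : index + ((j : Int) + 1) = index + 1 + (j : Int) := by ring
  simp only [Function.comp, Nat.cast_add, Nat.cast_one, h3, Nat.add_sub_cancel]
  rw [h1, pv_bit_low m c _ h2]

theorem pvB_pick_low (arr : List Int) (index : Int) (m c : Nat) (hc : c < 2 ^ m) :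
    pvB_pick arr index (m + 1) c = pvB_pick arr (index + 1) m c := by
  unfold pvB_pick
  rw [List.range_succ_eq_map, List.filterMap_cons, List.filterMap_map]
  simp only [Nat.add_sub_cancel, Nat.sub_zero, Nat.and_one_is_mod, pv_bit_top m c hc]
  norm_num
  apply List.filterMap_congr
  intro j hj
  have hj' : j < m := List.mem_range.mp hj
  have h1 : m - (j + 1) = m - 1 - j := by omega
  have h3 : index + ((j : Int) + 1) = index + 1 + (j : Int) := by ring
  simp only [Function.comp, Nat.cast_add, Nat.cast_one, h3]
  rw [h1]

theorem pvB_go_eq (arr : List Int) (k : Int) : ∀ (m : Nat) (index : Int)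
    (cur : List Int) (cs : Int) (res : List (List Int)),
    pvB_go arr k index cur cs res m = res ++ pvLeaves k (pvVals arr m index) cur cs := by
  intro m
  induction m with
  | zero =>
    intro index cur cs res
    unfold pvB_go pvB_pick
    simp only [pow_zero, List.range_one, List.reverse_singleton, List.foldl_cons, List.foldl_nil,
      List.range_zero, List.filterMap_nil, List.sum_nil, add_zero, List.append_nil]
    simp only [pvVals, pvLeaves]
    split <;> simp_all
  | succ m ih =>
    intro index cur cs res
    unfold pvB_go
    have hsplit : List.range (2 ^ (m + 1)) = List.range (2 ^ m) ++ (List.range (2 ^ m)).map (2 ^ m + ·) := by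
      rw [pow_succ, Nat.mul_two, List.range_add]
    rw [hsplit, List.reverse_append, ← List.map_reverse, List.foldl_append, List.foldl_map]
    have step1 : ∀ (init : List (List Int)),
        ((List.range (2 ^ m)).reverse).foldl
          (fun acc c =>
            let picked := pvB_pick arr index (m + 1) (2 ^ m + c)
            if cs + picked.sum = k then acc ++ [cur ++ picked] else acc) init
        = pvB_go arr k (index + 1) (cur ++ [PySem.List.pyGetD arr index 0])
            (cs + PySem.List.pyGetD arr index 0) init m := by
      intro init
      unfold pvB_go
      apply PySem.List.foldl_congr_mem
      intro acc c hcmem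
      have hc : c < 2 ^ m := List.mem_range.mp (List.mem_reverse.mp hcmem)
      simp only [pvB_pick_high arr index m c hc, List.sum_cons]
      have h1 : cs + (PySem.List.pyGetD arr index 0 + (pvB_pick arr (index + 1) m c).sum)
          = cs + PySem.List.pyGetD arr index 0 + (pvB_pick arr (index + 1) m c).sum := by ring
      rw [h1]
      simp
    have step2 : ∀ (init : List (List Int)),
        ((List.range (2 ^ m)).reverse).foldl
          (fun acc c =>
            let picked := pvB_pick arr index (m + 1) c
            if cs + picked.sum = k then acc ++ [cur ++ picked] else acc) init
        = pvB_go arr k (index + 1) cur cs init m := by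
      intro init
      unfold pvB_go
      apply PySem.List.foldl_congr_mem
      intro acc c hcmem
      have hc : c < 2 ^ m := List.mem_range.mp (List.mem_reverse.mp hcmem)
      rw [pvB_pick_low arr index m c hc]
    rw [step1, step2, ih, ih]
    simp [pvVals, pvLeaves, List.append_assoc]

-- ===== VERDICT (by name: the statement is the Claim_ definition above) =====
theorem find_subsequences_with_sum_k_spec : Claim_equal_find_subsequences_with_sum_k := by
  intro arr k index current current_sum result _ hpre
  obtain ⟨h1, h2⟩ := hpre
  unfold Spec_find_subsequences_with_sum_k find_subsequences_with_sum_k find_subsequences_with_sum_k_alt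
  rw [if_neg (by omega)]
  rw [pvA_go_eq arr k ((arr.length : Int) - index).toNat index _ _ _ h1 h2 rfl,
      pvB_go_eq]
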